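-- pv_equiv track=rewrite | github.com/alessio-cristofano/advent-of-code-2025 | day-two/main.py | check_valid_id
-- ===== SOURCE A (Python) =====
-- def check_valid_id(id_string:str) -> bool: #true if valid
--     # filter all the id_ranges with odd number of digits
--     length = len(id_string)
--     factors = []
--     for i in range(2,length+1):
--         if length % i == 0:
--             factors.append((i,int(length/i)))
--     #
--     for f in factors:
--         f1 = f[0] # reps
--         f2 = f[1] # number of digits
--
--         if id_string == f1*id_string[0:f2] and f1==2:
--             return False
--     return True
-- ===== SOURCE B (Python) =====
-- def check_valid_id(id_string: str) -> bool:
--     # Direct test: invalid exactly when the string is two identical non-empty halves.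
--     n = len(id_string)
--     return not (n > 0 and n % 2 == 0 and id_string[:n // 2] == id_string[n // 2:])
-- ===== Notes on version B (the rewrite author's own statement) =====
-- stated objective: simpler
-- what changed: Replaced A's factor-enumeration loop and factors list (which only ever acts on the factor 2) by a single slice comparison of the two halves.
import Mathlib
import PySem

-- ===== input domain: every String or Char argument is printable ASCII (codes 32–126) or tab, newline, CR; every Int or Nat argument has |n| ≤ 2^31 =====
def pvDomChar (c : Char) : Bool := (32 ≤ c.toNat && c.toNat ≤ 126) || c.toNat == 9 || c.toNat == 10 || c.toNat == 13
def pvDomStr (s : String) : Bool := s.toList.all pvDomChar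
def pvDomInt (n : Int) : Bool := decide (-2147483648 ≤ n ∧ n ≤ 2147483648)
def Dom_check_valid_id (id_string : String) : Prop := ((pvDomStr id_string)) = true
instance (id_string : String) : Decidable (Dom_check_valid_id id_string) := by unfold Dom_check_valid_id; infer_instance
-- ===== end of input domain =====

-- B is simpler: A's factor loop only ever acts on the factor 2, so B tests the two halves directly.

-- ===== PORT A =====
-- Python's int * str repetition (n copies of s concatenated; n ≤ 0 gives "")
def pvStrMul (n : Int) (s : List Char) : List Char :=
  (List.replicate n.toNat s).flatten

-- the second loop of A: 'for f in factors: … return False; return True'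
def pvCheckLoop (s : List Char) : List (Int × Int) → Bool
  | [] => true
  | f :: rest =>
    let f1 := f.1
    let f2 := f.2
    if s == pvStrMul f1 (PySem.List.slice s (some 0) (some f2)) && f1 == 2 then false
    else pvCheckLoop s rest

def check_valid_id (id_string : String) : Bool :=
  let s := id_string.toList
  let length : Int := s.length
  -- int(length/i) is exact here since it is computed only when length % i == 0: ported as floordiv
  let factors : List (Int × Int) :=
    (PySem.List.pyRange 2 (length + 1) 1).foldl
      (fun acc i => if PySem.Int.mod length i == 0 then acc ++ [(i, PySem.Int.floordiv length i)] else acc) []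
  pvCheckLoop s factors

-- ===== PORT B =====
def check_valid_id_alt (id_string : String) : Bool :=
  let s := id_string.toList
  let n : Int := s.length
  !(decide (n > 0) && (PySem.Int.mod n 2 == 0) &&
    (PySem.List.slice s none (some (PySem.Int.floordiv n 2)) ==
     PySem.List.slice s (some (PySem.Int.floordiv n 2)) none))

-- ===== PRECONDITION & SPEC =====
def Spec_check_valid_id (id_string : String) (out : Bool) : Prop := out = check_valid_id_alt id_string
instance (id_string : String) (out : Bool) : Decidable (Spec_check_valid_id id_string out) := by unfold Spec_check_valid_id; infer_instance

-- ===== CLAIM (what is proved, stated in full; the proofs are below) =====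
def Claim_equal_check_valid_id : Prop := ∀ (id_string : String), Dom_check_valid_id id_string → Spec_check_valid_id id_string (check_valid_id id_string)

-- ===== LEMMAS AND PROOFS =====

-- the loop returns false iff some factor pair triggers the branch
theorem pvCheckLoop_eq_true (s : List Char) (l : List (Int × Int)) :
    pvCheckLoop s l = true ↔
      ∀ f ∈ l, ¬(s = pvStrMul f.1 (PySem.List.slice s (some 0) (some f.2)) ∧ f.1 = 2) := by
  induction l with
  | nil => simp [pvCheckLoop]
  | cons f rest ih =>
    by_cases hb : s = pvStrMul f.1 (PySem.List.slice s (some 0) (some f.2)) ∧ f.1 = 2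
    · have hb' : (s == pvStrMul f.1 (PySem.List.slice s (some 0) (some f.2)) && f.1 == 2) = true := by
        rw [Bool.and_eq_true]
        exact ⟨beq_iff_eq.mpr hb.1, beq_iff_eq.mpr hb.2⟩
      simp only [pvCheckLoop, hb', if_true, Bool.false_eq_true, false_iff]
      intro h
      exact h f (List.mem_cons_self) hb
    · have hb' : (s == pvStrMul f.1 (PySem.List.slice s (some 0) (some f.2)) && f.1 == 2) = false := by
        rw [Bool.and_eq_false_iff]
        simp only [beq_eq_false_iff_ne, ne_eq]
        tauto
      simp only [pvCheckLoop, hb', Bool.false_eq_true, if_false, ih, List.forall_mem_cons]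
      tauto

theorem two_copies_iff (s : List Char) (k : Nat) (hlen : s.length = 2 * k) :
    s = s.take k ++ s.take k ↔ s.take k = s.drop k := by
  have htk : (s.take k).length = k := by simp; omega
  constructor
  · intro h
    have h2 : s.take k ++ s.drop k = s.take k ++ s.take k := by rw [List.take_append_drop]; exact h
    exact (List.append_cancel_left h2).symm
  · intro h
    conv_lhs => rw [← List.take_append_drop k s]
    rw [h]

theorem check_valid_id_spec : Claim_equal_check_valid_id := by
  intro id_string _
  unfold Spec_check_valid_id check_valid_id check_valid_id_alt
  rw [Bool.eq_iff_iff]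
  simp only [pvCheckLoop_eq_true]
  rw [PySem.List.foldl_append_if]
  set s := id_string.toList with hs
  set m := s.length with hm
  set k := m / 2 with hk
  have hfd : PySem.Int.floordiv (m : Int) 2 = (k : Int) := by
    show Int.fdiv (m : Int) 2 = (k : Int)
    rw [Int.fdiv_eq_ediv_of_nonneg _ (by norm_num)]
    omega
  have hmod : (PySem.Int.mod (m : Int) 2 = 0) ↔ m % 2 = 0 := by
    rw [PySem.Int.mod_eq_zero_iff_dvd]
    omega
  have hsl1 : PySem.List.slice s none (some ((k : Nat) : Int)) = s.take k :=
    PySem.List.slice_to_natCast s k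
  have hsl2 : PySem.List.slice s (some ((k : Nat) : Int)) none = s.drop k :=
    PySem.List.slice_from_natCast s k
  have hmul : pvStrMul 2 (s.take k) = s.take k ++ s.take k := by
    simp [pvStrMul, List.replicate]
  have hA : (∀ f ∈ (((PySem.List.pyRange 2 ((m : Int) + 1) 1).filter
        (fun i => PySem.Int.mod (m : Int) i == 0)).map
        (fun i => (i, PySem.Int.floordiv (m : Int) i))),
        ¬(s = pvStrMul f.1 (PySem.List.slice s (some 0) (some f.2)) ∧ f.1 = 2)) ↔
      ¬(2 ≤ m ∧ m % 2 = 0 ∧ s = s.take k ++ s.take k) := by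
    constructor
    · intro h hc
      refine h (2, (k : Int)) ?_ ?_
      · simp only [List.mem_map, List.mem_filter, PySem.List.mem_pyRange_one]
        refine ⟨2, ⟨⟨le_refl 2, by omega⟩, ?_⟩, by rw [hfd]⟩
        simp only [beq_iff_eq]
        exact hmod.mpr hc.2.1
      · refine ⟨?_, rfl⟩
        simp only [PySem.List.slice_zero_start, hsl1, hmul]
        exact hc.2.2
    · intro hc f hf hbad
      simp only [List.mem_map, List.mem_filter, PySem.List.mem_pyRange_one, beq_iff_eq] at hf
      obtain ⟨i, ⟨⟨hi2, hilt⟩, hidvd⟩, rfl⟩ := hf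
      have hi : i = 2 := hbad.2
      subst hi
      apply hc
      refine ⟨by omega, hmod.mp hidvd, ?_⟩
      have := hbad.1
      rw [hfd, PySem.List.slice_zero_start, hsl1, hmul] at this
      exact this
  have hiff : (¬(2 ≤ m ∧ m % 2 = 0 ∧ s = s.take k ++ s.take k)) ↔
      ¬(0 < m ∧ m % 2 = 0 ∧ s.take k = s.drop k) := by
    by_cases heven : m % 2 = 0
    · have hlen : s.length = 2 * k := by omega
      rw [two_copies_iff s k hlen]
      constructor <;> intro h hc <;> apply h <;> exact ⟨by omega, hc.2.1, hc.2.2⟩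
    · constructor <;> intro _ hc <;> exact heven hc.2.1
  rw [List.nil_append, hA, hiff, hfd, hsl1, hsl2]
  simp only [Bool.not_eq_true', Bool.eq_false_iff, ne_eq, Bool.and_eq_true, decide_eq_true_eq,
    beq_iff_eq, hmod, gt_iff_lt]
  constructor
  · intro h hc
    exact h ⟨by exact_mod_cast hc.1.1, hc.1.2, hc.2⟩
  · intro h hc
    exact h ⟨⟨by exact_mod_cast hc.1, hc.2.1⟩, hc.2.2⟩
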